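-- pv_equiv track=rewrite | github.com/dydwns99/Algorithm | PYTHON/Programmers/codingtest_kit/완전탐색(ExhaustiveSearch)/모음사전.py | solution
-- ===== SOURCE A (Python) =====
-- def order(n):
--     res=0
--     for i in range(1,n+1):
--         res+=5**i
--     return res
--
-- def solution(word):
--     # 많으면 많을 수록 큰거
--     # 그 중에서 AE
--     # 만약 첫번째 자리가 E 라면 그 이전의 문자열들의 개수 ->
--     # A + 5 + 5*5 + 5*5*5 + 5*5*5*5 (AUUUU) + E + `` (EUUUU) + I
--     l = 5
--     count=0
--     for w in word:
--         l-=1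
--         if w=='A':
--             count+=1
--         if w=='E':
--             count+= 1+1*(order(l)+1)
--         if w=='I':
--             count+= 1+2*(order(l)+1)
--         if w=='O':
--             count+= 1+3*(order(l)+1)
--         if w=='U':
--             count+= 1+4*(order(l)+1)
--
--     return count
-- ===== SOURCE B (Python) =====
-- def solution(word):
--     vowels = 'AEIOU'
--     l = 5
--     count = 0
--     for c in word:
--         l -= 1
--         if c in vowels:
--             count += 1 + vowels.index(c) * ((5 ** (max(l, 0) + 1) - 1) // 4)
--     return count
-- ===== Notes on version B (the rewrite author's own statement) =====
-- stated objective: simpler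
-- what changed: Replaces the order() summation helper and the five per-vowel if-branches with a single guarded update using the closed-form geometric-series weight (5**(l+1)-1)//4 (clamped at l=0) and the vowel's index in the vowel string.
import Mathlib
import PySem

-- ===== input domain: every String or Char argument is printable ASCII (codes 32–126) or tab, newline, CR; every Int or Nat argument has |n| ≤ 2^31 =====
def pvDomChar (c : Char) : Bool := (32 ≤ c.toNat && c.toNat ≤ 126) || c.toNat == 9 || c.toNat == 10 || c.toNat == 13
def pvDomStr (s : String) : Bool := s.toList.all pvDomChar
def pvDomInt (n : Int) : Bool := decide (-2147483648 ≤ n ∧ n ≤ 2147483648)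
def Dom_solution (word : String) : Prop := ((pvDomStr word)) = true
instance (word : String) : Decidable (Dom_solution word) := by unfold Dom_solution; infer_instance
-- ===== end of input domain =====

-- B replaces the order() summation helper and the five per-vowel branches with one
-- guarded update using the closed-form weight (5^(l+1)-1)//4 (clamped at l=0) and
-- the vowel's index in 'AEIOU'; objective: simpler.

-- ===== PORT A =====
-- helper order(n): res = 0; for i in range(1, n+1): res += 5**i; return res
def order (n : Int) : Int :=
  (PySem.List.pyRange 1 (n + 1) 1).foldl (fun res i => res + 5 ^ i.toNat) 0

def solution (word : String) : Int :=
  (word.toList.foldl (fun (st : Int × Int) w =>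
    let l := st.1 - 1
    let count := st.2
    let count := if w = 'A' then count + 1 else count
    let count := if w = 'E' then count + (1 + 1 * (order l + 1)) else count
    let count := if w = 'I' then count + (1 + 2 * (order l + 1)) else count
    let count := if w = 'O' then count + (1 + 3 * (order l + 1)) else count
    let count := if w = 'U' then count + (1 + 4 * (order l + 1)) else count
    (l, count)) (5, 0)).2

-- ===== PORT B =====
def solution_alt (word : String) : Int :=
  (word.toList.foldl (fun (st : Int × Int) c =>
    let l := st.1 - 1
    if ("AEIOU".toList).contains c then
      (l, st.2 + (1 + ((PySem.List.index? "AEIOU".toList c).getD 0) *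
            PySem.Int.floordiv (5 ^ ((max l 0) + 1).toNat - 1) 4))
    else (l, st.2)) (5, 0)).2

-- ===== PRECONDITION & SPEC =====
def Spec_solution (word : String) (out : Int) : Prop := out = solution_alt word
instance (word : String) (out : Int) : Decidable (Spec_solution word out) := by unfold Spec_solution; infer_instance

-- ===== CLAIM (what is proved, stated in full; the proofs are below) =====
def Claim_equal_solution : Prop := ∀ (word : String), Dom_solution word → Spec_solution word (solution word)

-- ===== LEMMAS AND PROOFS =====

lemma order_nonpos (l : Int) (h : l ≤ 0) : order l = 0 := by
  unfold order
  rw [PySem.List.pyRange_one_eq_nil (by omega)]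
  rfl

lemma order_nat (n : Nat) : 4 * order (n : Int) + 5 = 5 ^ (n + 1) := by
  induction n with
  | zero => simp [order_nonpos 0 le_rfl]
  | succ m ih =>
    have hsplit : PySem.List.pyRange 1 ((m : Int) + 1 + 1) 1
        = PySem.List.pyRange 1 ((m : Int) + 1) 1 ++ [(m : Int) + 1] :=
      PySem.List.pyRange_one_succ_right (by omega)
    have hstep : order ((m : Int) + 1) = order (m : Int) + 5 ^ (m + 1) := by
      unfold order
      rw [hsplit, List.foldl_append]
      simp
    have e : (5 : Int) ^ (m + 1 + 1) = 5 * 5 ^ (m + 1) := by ring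
    push_cast
    rw [hstep]
    linarith [ih, e]

-- order l + 1 equals the closed-form geometric-series weight (5^(l+1)-1)//4, clamped at l = 0
lemma weight_eq (l : Int) :
    order l + 1 = PySem.Int.floordiv (5 ^ ((max l 0) + 1).toNat - 1) 4 := by
  by_cases h : l ≤ 0
  · rw [order_nonpos l h]
    have hm : max l 0 = 0 := by omega
    rw [hm]
    decide
  · have hm : ((max l 0) + 1).toNat = l.toNat + 1 := by omega
    rw [hm]
    have hl : (l.toNat : Int) = l := by omega
    have h4 : 4 * order l + 5 = 5 ^ (l.toNat + 1) := by
      rw [← hl]; exact order_nat l.toNat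
    rw [eq_comm, PySem.Int.floordiv_eq_iff_of_pos (by norm_num : (0 : Int) < 4)]
    omega

-- the same statement with Lean's `/` (= floordiv for the positive divisor 4), the shape simp leaves
lemma weight_ediv (l : Int) :
    order l + 1 = (5 ^ ((max l 0) + 1).toNat - 1) / 4 := by
  rw [← PySem.Int.floordiv_eq_ediv_of_pos (by norm_num : (0 : Int) < 4)]
  exact weight_eq l

-- A's five-branch step equals B's guarded closed-form step, for every character
lemma step_eq (st : Int × Int) (c : Char) :
    (let l := st.1 - 1
     let count := st.2
     let count := if c = 'A' then count + 1 else count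
     let count := if c = 'E' then count + (1 + 1 * (order l + 1)) else count
     let count := if c = 'I' then count + (1 + 2 * (order l + 1)) else count
     let count := if c = 'O' then count + (1 + 3 * (order l + 1)) else count
     let count := if c = 'U' then count + (1 + 4 * (order l + 1)) else count
     ((l, count) : Int × Int)) =
    (let l := st.1 - 1
     if ("AEIOU".toList).contains c then
       (l, st.2 + (1 + ((PySem.List.index? "AEIOU".toList c).getD 0) *
             PySem.Int.floordiv (5 ^ ((max l 0) + 1).toNat - 1) 4))
     else (l, st.2)) := by
  have hw := weight_ediv (st.1 - 1)
  by_cases hA : c = 'A'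
  · subst hA; simp [PySem.List.index?, List.idxOf?, List.findIdx?, List.findIdx?.go]
  · by_cases hE : c = 'E'
    · subst hE
      simp [PySem.List.index?, List.idxOf?, List.findIdx?, List.findIdx?.go]
      linarith [hw]
    · by_cases hI : c = 'I'
      · subst hI
        simp [PySem.List.index?, List.idxOf?, List.findIdx?, List.findIdx?.go]
        linarith [hw]
      · by_cases hO : c = 'O'
        · subst hO
          simp [PySem.List.index?, List.idxOf?, List.findIdx?, List.findIdx?.go]
          linarith [hw]
        · by_cases hU : c = 'U'
          · subst hU
            simp [PySem.List.index?, List.idxOf?, List.findIdx?, List.findIdx?.go]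
            linarith [hw]
          · simp [hA, hE, hI, hO, hU]

-- ===== VERDICT (by name: the statement is the Claim_ definition above) =====
theorem solution_spec : Claim_equal_solution := by
  intro word _
  unfold Spec_solution solution solution_alt
  congr 2
  funext st c
  exact step_eq st c
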